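-- pv_equiv track=rewrite | github.com/frankier/finn-wsd-eval | table.py | get_attr_combs
-- ===== SOURCE A (Python) =====
-- def get_attr_combs(docs, attrs):
--     if len(attrs) == 0:
--         return [[]]
--     (head_attr, head_vals), tail = attrs[0], attrs[1:]
--     return [
--         [(head_attr, val)] + comb
--         for val in head_vals
--         for comb in get_attr_combs(docs, tail)
--     ]
-- ===== SOURCE B (Python) =====
-- def get_attr_combs(docs, attrs):
--     combs = [[]]
--     for attr, vals in attrs:
--         combs = [comb + [(attr, val)] for comb in combs for val in vals]
--     return combs
-- ===== Notes on version B (the rewrite author's own statement) =====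
-- stated objective: simpler
-- what changed: Replaces the recursion over the attr list (which re-enumerates the tail product for every head value) with a single iterative left-to-right fold that extends each partial combination in place.
import Mathlib
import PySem

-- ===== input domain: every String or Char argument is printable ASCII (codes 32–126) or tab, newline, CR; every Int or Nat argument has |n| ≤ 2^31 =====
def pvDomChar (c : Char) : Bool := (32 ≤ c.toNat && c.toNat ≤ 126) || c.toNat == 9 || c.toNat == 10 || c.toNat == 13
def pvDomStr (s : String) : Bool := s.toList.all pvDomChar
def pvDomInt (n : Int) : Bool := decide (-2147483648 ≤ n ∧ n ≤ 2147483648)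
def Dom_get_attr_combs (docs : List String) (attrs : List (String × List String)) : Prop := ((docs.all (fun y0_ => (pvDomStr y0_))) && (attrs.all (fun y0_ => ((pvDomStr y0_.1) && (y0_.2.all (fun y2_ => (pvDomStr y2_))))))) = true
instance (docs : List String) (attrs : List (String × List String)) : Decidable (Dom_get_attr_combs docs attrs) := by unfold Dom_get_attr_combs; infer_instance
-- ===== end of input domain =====

-- B replaces A's recursion over the attr list with one iterative fold extending partial combinations (simpler decomposition, same result).


-- ===== PORT A =====
def get_attr_combs (docs : List String) (attrs : List (String × List String)) : List (List (String × String)) :=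
  match attrs with
  | [] => [[]]
  | (head_attr, head_vals) :: tail =>
    head_vals.flatMap (fun val =>
      (get_attr_combs docs tail).map (fun comb => [(head_attr, val)] ++ comb))

-- ===== PORT B =====
def get_attr_combs_alt (docs : List String) (attrs : List (String × List String)) : List (List (String × String)) :=
  attrs.foldl
    (fun combs av => combs.flatMap (fun comb => av.2.map (fun val => comb ++ [(av.1, val)])))
    [[]]

-- ===== PRECONDITION & SPEC =====
def Spec_get_attr_combs (docs : List String) (attrs : List (String × List String)) (out : List (List (String × String))) : Prop := out = get_attr_combs_alt docs attrs
instance (docs : List String) (attrs : List (String × List String)) (out : List (List (String × String))) : Decidable (Spec_get_attr_combs docs attrs out) := by unfold Spec_get_attr_combs; infer_instance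

-- ===== CLAIM (what is proved, stated in full; the proofs are below) =====
def Claim_equal_get_attr_combs : Prop := ∀ (docs : List String) (attrs : List (String × List String)), Dom_get_attr_combs docs attrs → Spec_get_attr_combs docs attrs (get_attr_combs docs attrs)

-- ===== LEMMAS AND PROOFS =====
-- Loop invariant for B's fold: folding the step over `attrs` starting from any
-- accumulator `acc` appends every combination of A's recursive product to every
-- element of `acc`.
theorem foldl_step_eq (docs : List String) (attrs : List (String × List String))
    (acc : List (List (String × String))) :
    attrs.foldl
      (fun combs av => combs.flatMap (fun comb => av.2.map (fun val => comb ++ [(av.1, val)])))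
      acc
    = acc.flatMap (fun c => (get_attr_combs docs attrs).map (fun r => c ++ r)) := by
  induction attrs generalizing acc with
  | nil => simp [get_attr_combs]
  | cons hd tl ih =>
    obtain ⟨k, vs⟩ := hd
    simp only [List.foldl_cons, ih, get_attr_combs]
    simp [List.flatMap_map, List.map_flatMap, List.flatMap_assoc, List.map_map,
      Function.comp_def, List.append_assoc]

-- ===== VERDICT (by name: the statement is the Claim_ definition above) =====
theorem get_attr_combs_spec : Claim_equal_get_attr_combs := by
  intro docs attrs _
  unfold Spec_get_attr_combs get_attr_combs_alt
  rw [foldl_step_eq docs]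
  simp
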